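-- pv_equiv track=rewrite | github.com/hyunjun1121/DrawingBench | src/evaluator.py | _count_drawing_segments
-- ===== SOURCE A (Python) =====
-- def _count_drawing_segments(actions):
--     """Count number of continuous drawing segments"""
--     segments = 0
--     in_segment = False
--
--     for action in actions:
--         if action.get("action") == "mouseDown":
--             if not in_segment:
--                 segments += 1
--                 in_segment = True
--         elif action.get("action") == "mouseUp":
--             in_segment = False
--
--     return segments
-- ===== SOURCE B (Python) =====
-- def _count_drawing_segments(actions):
--     states = [a.get("action") for a in actions
--               if a.get("action") in ("mouseDown", "mouseUp")]
--     return sum(1 for prev, cur in zip(["mouseUp"] + states, states)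
--                if prev == "mouseUp" and cur == "mouseDown")
-- ===== Notes on version B (the rewrite author's own statement) =====
-- stated objective: alternative
-- what changed: B first projects the mouseDown/mouseUp events into a list and then counts rising edges (mouseUp-to-mouseDown transitions in the zipped pair stream) instead of threading an in_segment boolean through one stateful loop.
import Mathlib
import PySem

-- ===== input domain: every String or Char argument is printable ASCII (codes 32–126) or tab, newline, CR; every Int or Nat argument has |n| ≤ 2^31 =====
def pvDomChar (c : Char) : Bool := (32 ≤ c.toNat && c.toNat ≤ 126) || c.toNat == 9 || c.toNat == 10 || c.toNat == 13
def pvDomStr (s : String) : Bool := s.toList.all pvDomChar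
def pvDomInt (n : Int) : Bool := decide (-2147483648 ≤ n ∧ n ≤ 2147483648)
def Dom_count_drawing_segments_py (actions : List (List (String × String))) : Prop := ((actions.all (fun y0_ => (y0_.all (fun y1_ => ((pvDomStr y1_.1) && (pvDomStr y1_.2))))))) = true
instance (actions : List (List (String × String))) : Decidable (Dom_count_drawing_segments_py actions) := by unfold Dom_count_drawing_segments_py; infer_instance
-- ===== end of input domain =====

-- B counts segments as mouseUp→mouseDown rising edges over the projected mouse-event list, replacing A's in_segment flag loop (alternative decomposition, same cost).


-- ===== PORT A =====
-- action.get("action"): first-match lookup in the association list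
def count_drawing_segments_py (actions : List (List (String × String))) : Int :=
  (actions.foldl (fun st action =>
      if List.lookup "action" action = some "mouseDown" then
        (if st.2 then st else (st.1 + 1, true))
      else if List.lookup "action" action = some "mouseUp" then
        (st.1, false)
      else st)
    ((0 : Int), false)).1

-- ===== PORT B =====
-- states = [a.get("action") for a in actions if a.get("action") in ("mouseDown","mouseUp")]
def pvStatesOf (actions : List (List (String × String))) : List String :=
  actions.filterMap (fun a =>
    match List.lookup "action" a with
    | some s => if s = "mouseDown" ∨ s = "mouseUp" then some s else none
    | none => none)

-- sum(1 for prev, cur in zip(["mouseUp"] + states, states) if prev == "mouseUp" and cur == "mouseDown")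
def count_drawing_segments_py_alt (actions : List (List (String × String))) : Int :=
  let states := pvStatesOf actions
  (List.zip ("mouseUp" :: states) states).foldl
    (fun n p => if p.1 = "mouseUp" ∧ p.2 = "mouseDown" then n + 1 else n) 0

-- ===== PRECONDITION & SPEC =====
def Spec_count_drawing_segments_py (actions : List (List (String × String))) (out : Int) : Prop := out = count_drawing_segments_py_alt actions
instance (actions : List (List (String × String))) (out : Int) : Decidable (Spec_count_drawing_segments_py actions out) := by unfold Spec_count_drawing_segments_py; infer_instance

-- ===== CLAIM (what is proved, stated in full; the proofs are below) =====
def Claim_equal_count_drawing_segments_py : Prop := ∀ (actions : List (List (String × String))), Dom_count_drawing_segments_py actions → Spec_count_drawing_segments_py actions (count_drawing_segments_py actions)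

-- ===== LEMMAS AND PROOFS =====

-- A's step, restricted to the projected state strings
def pvStepA (st : Int × Bool) (s : String) : Int × Bool :=
  if s = "mouseDown" then (if st.2 then st else (st.1 + 1, true))
  else if s = "mouseUp" then (st.1, false)
  else st

-- A's fold over the raw actions equals the same fold over the projected states
theorem foldA_eq_states (actions : List (List (String × String))) :
    ∀ st : Int × Bool,
      actions.foldl (fun st action =>
        if List.lookup "action" action = some "mouseDown" then
          (if st.2 then st else (st.1 + 1, true))
        else if List.lookup "action" action = some "mouseUp" then
          (st.1, false)
        else st) st
      = (pvStatesOf actions).foldl pvStepA st := by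
  induction actions with
  | nil => intro st; rfl
  | cons a rest ih =>
    intro st
    simp only [List.foldl_cons, pvStatesOf, List.filterMap_cons]
    cases h : List.lookup "action" a with
    | none =>
      simp only [pvStatesOf] at ih ⊢
      simp [ih]
    | some s =>
      by_cases hd : s = "mouseDown"
      · subst hd
        simp only [pvStatesOf] at ih
        simp [pvStepA, ih]  -- mouseDown branch
      · by_cases hu : s = "mouseUp"
        · subst hu
          simp only [pvStatesOf] at ih
          simp [hd, pvStepA, ih]
        · simp only [pvStatesOf] at ih
          simp [hd, hu, ih]

theorem members_states (actions : List (List (String × String))) :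
    ∀ s ∈ pvStatesOf actions, s = "mouseDown" ∨ s = "mouseUp" := by
  intro s hs
  simp only [pvStatesOf, List.mem_filterMap] at hs
  obtain ⟨a, _, ha⟩ := hs
  cases h : List.lookup "action" a with
  | none => simp [h] at ha
  | some t =>
    simp [h] at ha
    obtain ⟨ht, rfl⟩ := ha
    exact ht

-- the flag fold equals the rising-edge fold, with prev tracking the flag
theorem fold_flag_eq_edges (states : List String)
    (hmem : ∀ s ∈ states, s = "mouseDown" ∨ s = "mouseUp") :
    ∀ (prev : String), (prev = "mouseDown" ∨ prev = "mouseUp") →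
    ∀ seg : Int,
      (states.foldl pvStepA (seg, prev = "mouseDown")).1
      = (List.zip (prev :: states) states).foldl
          (fun n p => if p.1 = "mouseUp" ∧ p.2 = "mouseDown" then n + 1 else n) seg := by
  induction states with
  | nil => intro prev _ seg; rfl
  | cons s rest ih =>
    intro prev hprev seg
    have hs := hmem s (List.mem_cons_self ..)
    have hrest : ∀ t ∈ rest, t = "mouseDown" ∨ t = "mouseUp" :=
      fun t ht => hmem t (List.mem_cons_of_mem _ ht)
    simp only [List.zip_cons_cons, List.foldl_cons]
    rcases hs with hs | hs <;> subst hs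
    · -- s = "mouseDown"
      rcases hprev with hp | hp <;> subst hp
      · -- prev = "mouseDown": flag true, no edge
        have := ih hrest "mouseDown" (Or.inl rfl) seg
        simpa [pvStepA] using this
      · -- prev = "mouseUp": flag false, edge counted
        have := ih hrest "mouseDown" (Or.inl rfl) (seg + 1)
        simpa [pvStepA] using this
    · -- s = "mouseUp": flag reset, no edge
      have := ih hrest "mouseUp" (Or.inr rfl) seg
      simpa [pvStepA] using this

-- ===== VERDICT (by name: the statement is the Claim_ definition above) =====
theorem count_drawing_segments_py_spec : Claim_equal_count_drawing_segments_py := by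
  intro actions _
  unfold Spec_count_drawing_segments_py count_drawing_segments_py count_drawing_segments_py_alt
  rw [foldA_eq_states]
  have h := fold_flag_eq_edges (pvStatesOf actions) (members_states actions)
      "mouseUp" (Or.inr rfl) 0
  simpa using h
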